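-- pv_equiv track=rewrite | github.com/alexandreabeinfo/controle-operacional-realtime | abnf000u00s00003.py | abnf_websocket_valida_estrutura_usuario
-- ===== SOURCE A (Python) =====
-- def abnf_websocket_valida_estrutura_usuario(stextchk):
--     if not stextchk: return True
--     stxtlist = 'ABCDEFGHIJKLMNOPQRSTUVWXYZ0123456789'
--     ilentext = len(stextchk)
--     sauxstru = ''
--     bvalidad = True
--     for iauxi001 in range(ilentext):
--         if stextchk[iauxi001] == '.':
--             sauxstru = sauxstru + '.'
--             bvalidad = True
--         else:
--             iauxi002 = stxtlist.find(stextchk[iauxi001])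
--             if iauxi002 >= 0 and bvalidad:
--                 sauxstru = sauxstru + 'X'
--                 bvalidad = False
--     if sauxstru == 'X.X': return True
--     else: return False
-- ===== SOURCE B (Python) =====
-- def abnf_websocket_valida_estrutura_usuario(stextchk):
--     if not stextchk:
--         return True
--     valid = 'ABCDEFGHIJKLMNOPQRSTUVWXYZ0123456789'
--     parts = stextchk.split('.')
--     if len(parts) != 2:
--         return False
--     return any(c in valid for c in parts[0]) and any(c in valid for c in parts[1])
-- ===== Notes on version B (the rewrite author's own statement) =====
-- stated objective: simpler
-- what changed: Replaces the run-collapsing state-machine scan that builds a structure string character by character with a single str.split on the dot separator into exactly two segments, each required to contain at least one uppercase letter or digit.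
import Mathlib
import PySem

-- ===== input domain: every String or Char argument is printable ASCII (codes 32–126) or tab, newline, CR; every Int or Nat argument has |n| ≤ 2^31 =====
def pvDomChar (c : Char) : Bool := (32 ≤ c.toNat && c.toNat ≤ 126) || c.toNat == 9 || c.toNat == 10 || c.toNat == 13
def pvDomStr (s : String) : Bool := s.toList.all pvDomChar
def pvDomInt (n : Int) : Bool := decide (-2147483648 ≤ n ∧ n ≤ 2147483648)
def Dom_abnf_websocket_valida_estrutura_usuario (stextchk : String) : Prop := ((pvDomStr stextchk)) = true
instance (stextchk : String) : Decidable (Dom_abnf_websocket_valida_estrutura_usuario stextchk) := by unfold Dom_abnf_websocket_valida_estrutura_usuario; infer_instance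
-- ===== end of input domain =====

-- B replaces A's structure-string state machine by a split on '.' into exactly two
-- segments each containing at least one uppercase letter or digit (objective: simpler).

-- ===== PORT A =====
def pvAlpha : List Char := "ABCDEFGHIJKLMNOPQRSTUVWXYZ0123456789".toList

-- one iteration of A's for-loop: state = (sauxstru, bvalidad)
def pvAStep (st : List Char × Bool) (c : Char) : List Char × Bool :=
  if c = '.' then (st.1 ++ ['.'], true)
  else
    let iauxi002 := PySem.Chars.find pvAlpha [c]
    if 0 ≤ iauxi002 ∧ st.2 = true then (st.1 ++ ['X'], false) else st

def abnf_websocket_valida_estrutura_usuario (stextchk : String) : Bool :=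
  if stextchk.toList = [] then true
  else
    let r := stextchk.toList.foldl pvAStep ([], true)
    decide (r.1 = ['X', '.', 'X'])

-- ===== PORT B =====
def pvHasValid (p : List Char) : Bool := p.any (fun c => PySem.Chars.isIn [c] pvAlpha)

def abnf_websocket_valida_estrutura_usuario_alt (stextchk : String) : Bool :=
  if stextchk.toList = [] then true
  else
    match stextchk.toList.splitOn '.' with
    | [p0, p1] => pvHasValid p0 && pvHasValid p1
    | _ => false

-- ===== PRECONDITION & SPEC =====
def Spec_abnf_websocket_valida_estrutura_usuario (stextchk : String) (out : Bool) : Prop := out = abnf_websocket_valida_estrutura_usuario_alt stextchk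
instance (stextchk : String) (out : Bool) : Decidable (Spec_abnf_websocket_valida_estrutura_usuario stextchk out) := by unfold Spec_abnf_websocket_valida_estrutura_usuario; infer_instance

-- ===== CLAIM (what is proved, stated in full; the proofs are below) =====
def Claim_equal_abnf_websocket_valida_estrutura_usuario : Prop := ∀ (stextchk : String), Dom_abnf_websocket_valida_estrutura_usuario stextchk → Spec_abnf_websocket_valida_estrutura_usuario stextchk (abnf_websocket_valida_estrutura_usuario stextchk)

-- ===== LEMMAS AND PROOFS =====

-- the structure string A's loop builds, read off the split parts
def pvMarks (b : Bool) (parts : List (List Char)) : List Char :=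
  match parts with
  | [] => []
  | p :: ps =>
      (if b && pvHasValid p then ['X'] else []) ++
      ps.flatMap (fun q => '.' :: (if pvHasValid q then ['X'] else []))

theorem pvMarks_cons (b : Bool) (p : List Char) (ps : List (List Char)) :
    pvMarks b (p :: ps) = (if b && pvHasValid p then ['X'] else []) ++
      ps.flatMap (fun q => '.' :: (if pvHasValid q then ['X'] else [])) := rfl

theorem pvHasValid_nil : pvHasValid [] = false := rfl

theorem pvHasValid_cons (c : Char) (p : List Char) :
    pvHasValid (c :: p) = (PySem.Chars.isIn [c] pvAlpha || pvHasValid p) := rfl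

theorem pvAcc_iff (c : Char) :
    (0 ≤ PySem.Chars.find pvAlpha [c]) ↔ PySem.Chars.isIn [c] pvAlpha = true := by
  rw [PySem.Chars.find_nonneg_iff, PySem.Chars.isIn_iff_infix]

theorem pvSplit_ne_nil (l : List Char) : l.splitOn '.' ≠ [] := by
  simpa [List.splitOn] using List.splitOnP_ne_nil (fun c => c == '.') l

theorem pvKey (l : List Char) (acc : List Char) (b : Bool) :
    (l.foldl pvAStep (acc, b)).1 = acc ++ pvMarks b (l.splitOn '.') := by
  induction l generalizing acc b with
  | nil =>
    rw [show ([] : List Char).splitOn '.' = [[]] by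
          simp [List.splitOn, List.splitOnP_nil],
        pvMarks_cons, pvHasValid_nil]
    simp
  | cons c t ih =>
    obtain ⟨p0, ps, hps⟩ := List.exists_cons_of_ne_nil (pvSplit_ne_nil t)
    by_cases hdot : c = '.'
    · subst hdot
      rw [List.foldl_cons]
      have hstep : pvAStep (acc, b) '.' = (acc ++ ['.'], true) := by simp [pvAStep]
      rw [hstep, ih]
      have hsplit : ('.' :: t).splitOn '.' = [] :: t.splitOn '.' := by
        simp [List.splitOn, List.splitOnP_cons]
      rw [hsplit, hps, pvMarks_cons, pvMarks_cons, pvHasValid_nil]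
      simp [List.flatMap_cons]
    · have hsplit : (c :: t).splitOn '.' = (c :: p0) :: ps := by
        simp only [List.splitOn, List.splitOnP_cons, beq_iff_eq, if_neg hdot]
        rw [show List.splitOnP (fun x => x == '.') t = t.splitOn '.' from rfl, hps]
        rfl
      rw [List.foldl_cons, hsplit]
      by_cases hacc : PySem.Chars.isIn [c] pvAlpha = true
      · have hfind : (0 ≤ PySem.Chars.find pvAlpha [c]) := (pvAcc_iff c).mpr hacc
        cases b with
        | true =>
          have hstep : pvAStep (acc, true) c = (acc ++ ['X'], false) := by
            simp [pvAStep, hdot, hfind]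
          rw [hstep, ih, hps, pvMarks_cons, pvMarks_cons, pvHasValid_cons, hacc]
          simp
        | false =>
          have hstep : pvAStep (acc, false) c = (acc, false) := by
            simp [pvAStep, hdot]
          rw [hstep, ih, hps, pvMarks_cons, pvMarks_cons]
          simp
      · have hfind : ¬ (0 ≤ PySem.Chars.find pvAlpha [c]) :=
          fun h => hacc ((pvAcc_iff c).mp h)
        have hstep : pvAStep (acc, b) c = (acc, b) := by
          simp [pvAStep, hdot, hfind]
        rw [hstep, ih, hps, pvMarks_cons, pvMarks_cons, pvHasValid_cons,
            Bool.eq_false_iff.mpr hacc]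
        simp

theorem pvFinal (parts : List (List Char)) :
    decide (pvMarks true parts = ['X', '.', 'X']) =
      (match parts with
       | [p0, p1] => pvHasValid p0 && pvHasValid p1
       | _ => false) := by
  match parts with
  | [] => rfl
  | [p0] =>
    rw [pvMarks_cons]
    cases h0 : pvHasValid p0 <;> simp [h0]
  | [p0, p1] =>
    rw [pvMarks_cons]
    cases h0 : pvHasValid p0 <;> cases h1 : pvHasValid p1 <;> simp [h0, h1]
  | p0 :: p1 :: p2 :: ps =>
    rw [pvMarks_cons]
    cases h0 : pvHasValid p0 <;> cases h1 : pvHasValid p1 <;>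
      simp [h0, h1, List.flatMap_cons]

-- ===== VERDICT (by name: the statement is the Claim_ definition above) =====
theorem abnf_websocket_valida_estrutura_usuario_spec : Claim_equal_abnf_websocket_valida_estrutura_usuario := by
  intro s _
  unfold Spec_abnf_websocket_valida_estrutura_usuario
  unfold abnf_websocket_valida_estrutura_usuario abnf_websocket_valida_estrutura_usuario_alt
  by_cases hnil : s.toList = []
  · simp [hnil]
  · simp only [hnil]
    rw [pvKey s.toList [] true, List.nil_append, pvFinal (s.toList.splitOn '.')]
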